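-- pv_equiv track=rewrite | github.com/guiMendel/viginere-cypher | attack.py | getCharacterStreams
-- ===== SOURCE A (Python) =====
-- def getCharacterStreams(cipher, keySize):
--     # For each character i of the key with size n, get it's i-stream: a string composed of every nth character of the cipher, starting with the ith character
--     iStreams = []
--
--     # Size of cipher
--     cipherSize = len(cipher)
--
--     for i in range(keySize):
--         # Get every nth character of the cipher, starting at i
--         iStreamArray = [cipher[index]
--                         for index in range(i, cipherSize, keySize)]
--
--         # Turn into a string
--         iStream = ''.join(iStreamArray)
--
--         # Append it
--         iStreams.append(iStream)
--
--     # Return the array of tuples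
--     return iStreams
-- ===== SOURCE B (Python) =====
-- def getCharacterStreams(cipher, keySize):
--     # Distribute the cipher's characters into keySize buckets in one forward
--     # pass with a cycling bucket pointer, instead of slicing per stream.
--     if keySize <= 0:
--         return []
--     buckets = [[] for _ in range(keySize)]
--     i = 0
--     for ch in cipher:
--         buckets[i].append(ch)
--         i = i + 1
--         if i == keySize:
--             i = 0
--     return [''.join(bucket) for bucket in buckets]
-- ===== Notes on version B (the rewrite author's own statement) =====
-- stated objective: faster
-- what changed: Replaces the per-stream stride slicing (one indexing pass over the cipher per key position, via range(i, len, keySize)) with a single forward pass that deals each character into one of keySize bucket lists using a cycling pointer, then joins the buckets; keySize <= 0 returns [] up front.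
import Mathlib
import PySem

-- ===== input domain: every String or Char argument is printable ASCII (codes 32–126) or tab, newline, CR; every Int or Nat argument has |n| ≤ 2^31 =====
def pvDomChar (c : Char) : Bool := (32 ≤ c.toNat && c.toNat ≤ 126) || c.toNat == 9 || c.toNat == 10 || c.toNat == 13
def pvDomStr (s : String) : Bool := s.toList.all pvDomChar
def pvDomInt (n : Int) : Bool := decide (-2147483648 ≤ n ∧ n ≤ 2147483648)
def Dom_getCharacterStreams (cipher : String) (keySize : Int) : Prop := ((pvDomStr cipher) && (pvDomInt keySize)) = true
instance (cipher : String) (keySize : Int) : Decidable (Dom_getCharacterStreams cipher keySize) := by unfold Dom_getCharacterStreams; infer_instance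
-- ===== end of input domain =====

-- B replaces A's per-stream stride slicing with a single forward pass dealing
-- each character into one of keySize buckets via a cycling pointer (constant-factor
-- speedup, measured).

-- ===== PORT A =====
-- cipher[index] is always in range here, so pyGetD (with an unreachable default) is exact.
def getCharacterStreams (cipher : String) (keySize : Int) : List String :=
  let cipherSize : Int := PySem.Str.len cipher
  (PySem.List.pyRange 0 keySize 1).foldl
    (fun iStreams i =>
      let iStreamArray : List Char :=
        (PySem.List.pyRange i cipherSize keySize).map
          (fun index => PySem.List.pyGetD cipher.toList index ' ')
      let iStream : String := String.mk iStreamArray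
      iStreams ++ [iStream])
    []

-- ===== PORT B =====
-- one fold step of B's loop: append ch to buckets[i], advance the cycling pointer
def gcsAltStep (n : Nat) (st : List (List Char) × Nat) (ch : Char) : List (List Char) × Nat :=
  let bs := st.1.set st.2 (st.1.getD st.2 [] ++ [ch])
  let i := st.2 + 1
  (bs, if i = n then 0 else i)

def getCharacterStreams_alt (cipher : String) (keySize : Int) : List String :=
  if keySize ≤ 0 then []
  else
    let n := keySize.toNat
    let buckets : List (List Char) := List.replicate n []
    let st := cipher.toList.foldl (gcsAltStep n) (buckets, 0)
    st.1.map (fun bucket => String.mk bucket)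

-- ===== PRECONDITION & SPEC =====
def Spec_getCharacterStreams (cipher : String) (keySize : Int) (out : List String) : Prop := out = getCharacterStreams_alt cipher keySize
instance (cipher : String) (keySize : Int) (out : List String) : Decidable (Spec_getCharacterStreams cipher keySize out) := by unfold Spec_getCharacterStreams; infer_instance

-- ===== CLAIM (what is proved, stated in full; the proofs are below) =====
def Claim_equal_getCharacterStreams : Prop := ∀ (cipher : String) (keySize : Int), Dom_getCharacterStreams cipher keySize → Spec_getCharacterStreams cipher keySize (getCharacterStreams cipher keySize)

-- ===== LEMMAS AND PROOFS =====

-- countdown picker: take the character when the countdown hits 0, then reset to n-1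
def pickS : List Char → Nat → Nat → List Char
  | [], _, _ => []
  | c :: cs, 0, n => c :: pickS cs (n - 1) n
  | _ :: cs, d + 1, n => pickS cs d n

-- cyclic-pointer picker: take the character when the pointer equals j
def pickT : List Char → Nat → Nat → Nat → List Char
  | [], _, _, _ => []
  | c :: cs, i, j, n =>
    let i' := if i + 1 = n then 0 else i + 1
    if i = j then c :: pickT cs i' j n else pickT cs i' j n

-- pyRange shifts by one on both endpoints (positive step)
theorem pyRange_shift (a b s : Int) (hs : 0 < s) :
    PySem.List.pyRange (a + 1) (b + 1) s = (PySem.List.pyRange a b s).map (· + 1) := by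
  rw [PySem.List.pyRange_of_pos _ _ hs, PySem.List.pyRange_of_pos _ _ hs, List.map_map]
  have hc : (if a + 1 < b + 1 then ((b + 1 - (a + 1) + s - 1) / s).toNat else 0)
      = (if a < b then ((b - a + s - 1) / s).toNat else 0) := by
    by_cases h : a < b
    · rw [if_pos (by omega), if_pos h]
      congr 2
      ring
    · rw [if_neg (by omega), if_neg h]
  rw [hc]
  exact List.map_congr_left (fun k _ => by simp; ring)

-- pyRange cons for a positive step
theorem pyRange_cons (a b s : Int) (hs : 0 < s) (hab : a < b) :
    PySem.List.pyRange a b s = a :: PySem.List.pyRange (a + s) b s := by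
  rw [PySem.List.pyRange_of_pos _ _ hs, PySem.List.pyRange_of_pos _ _ hs]
  have hcount : (if a < b then ((b - a + s - 1) / s).toNat else 0)
      = (if a + s < b then ((b - (a + s) + s - 1) / s).toNat else 0) + 1 := by
    rw [if_pos hab]
    have hd : b - a + s - 1 = (b - a - 1) + s := by ring
    have hd0 : 0 ≤ b - a - 1 := by omega
    have hdiv : (b - a + s - 1) / s = (b - a - 1) / s + 1 := by
      have h1 : b - a + s - 1 = (b - a - 1) + 1 * s := by ring
      rw [h1, Int.add_mul_ediv_right _ _ (by omega : s ≠ 0)]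
    by_cases hc : a + s < b
    · rw [if_pos hc, hdiv]
      have : b - (a + s) + s - 1 = b - a - 1 := by ring
      rw [this]
      have h0 : 0 ≤ (b - a - 1) / s := Int.ediv_nonneg hd0 (le_of_lt hs)
      omega
    · rw [if_neg hc, hdiv]
      have : (b - a - 1) / s = 0 := Int.ediv_eq_zero_of_lt hd0 (by omega)
      omega
  rw [hcount, List.range_succ_eq_map, List.map_cons, List.map_map]
  congr 1
  · simp
  · exact List.map_congr_left (fun k _ => by simp; ring)

-- A's stride slice starting at j equals the countdown picker
theorem stride_eq_pickS (n : Nat) (hn : 0 < n) :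
    ∀ (l : List Char) (j : Nat), j < n →
      (PySem.List.pyRange (j : Int) (l.length : Int) (n : Int)).map
        (fun index => PySem.List.pyGetD l index ' ') = pickS l j n := by
  intro l
  induction l with
  | nil =>
    intro j _
    rw [PySem.List.pyRange_of_pos _ _ (by exact_mod_cast hn)]
    simp [pickS]
  | cons c cs ih =>
    intro j hj
    have hshift : ∀ (a : Nat), a < n →
        (PySem.List.pyRange ((a : Int) + 1) ((cs.length : Int) + 1) (n : Int)).map
          (fun index => PySem.List.pyGetD (c :: cs) index ' ') = pickS cs a n := by
      intro a ha
      rw [pyRange_shift _ _ _ (by exact_mod_cast hn), List.map_map]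
      rw [← ih a ha]
      refine List.map_congr_left (fun x hx => ?_)
      have hx0 : 0 ≤ x := by
        have := (PySem.List.mem_pyRange_iff_of_pos (by exact_mod_cast hn) x).1 hx
        have : (a : Int) ≤ x := this.1
        omega
      obtain ⟨m, rfl⟩ := Int.eq_ofNat_of_zero_le hx0
      show PySem.List.pyGetD (c :: cs) ((m : Int) + 1) ' ' = PySem.List.pyGetD cs (m : Int) ' '
      have : ((m : Int) + 1) = ((m + 1 : Nat) : Int) := by push_cast; ring
      rw [this, PySem.List.pyGetD_natCast, PySem.List.pyGetD_natCast]
      simp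
    match j with
    | 0 =>
      have hlen : (0 : Int) < ((c :: cs).length : Int) := by simp
      rw [Nat.cast_zero,
          pyRange_cons 0 ((c :: cs).length : Int) (n : Int) (by exact_mod_cast hn) hlen,
          List.map_cons]
      have hhead : PySem.List.pyGetD (c :: cs) ((0 : Nat) : Int) ' ' = c := by
        rw [PySem.List.pyGetD_natCast]; rfl
      have htail :
          (PySem.List.pyRange ((0 : Int) + (n : Int)) (((c :: cs).length : Int)) (n : Int)).map
            (fun index => PySem.List.pyGetD (c :: cs) index ' ') = pickS cs (n - 1) n := by
        have he : (0 : Int) + (n : Int) = ((n - 1 : Nat) : Int) + 1 := by push_cast [hn]; omega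
        have hl : (((c :: cs).length : Int)) = ((cs.length : Int)) + 1 := by simp
        rw [he, hl]
        exact hshift (n - 1) (by omega)
      rw [htail]
      show (PySem.List.pyGetD (c :: cs) 0 ' ') :: pickS cs (n - 1) n = pickS (c :: cs) 0 n
      have : PySem.List.pyGetD (c :: cs) 0 ' ' = c := by exact_mod_cast hhead
      rw [this]; rfl
    | j' + 1 =>
      have he : ((j' + 1 : Nat) : Int) = ((j' : Nat) : Int) + 1 := by push_cast; ring
      have hl : (((c :: cs).length : Int)) = ((cs.length : Int)) + 1 := by simp
      rw [he, hl, hshift j' (by omega)]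
      rfl

-- the cyclic-pointer picker equals the countdown picker at the right distance
theorem pickT_eq_pickS (n : Nat) (hn : 0 < n) :
    ∀ (l : List Char) (i j : Nat), i < n → j < n →
      pickT l i j n = pickS l (if i ≤ j then j - i else j + n - i) n := by
  intro l
  induction l with
  | nil => intro i j _ _; cases h : (if i ≤ j then j - i else j + n - i) <;> rfl
  | cons c cs ih =>
    intro i j hi hj
    by_cases hij : i = j
    · subst hij
      have hd : (if i ≤ i then i - i else i + n - i) = 0 := by simp
      rw [hd]
      show (if i = i then c :: pickT cs (if i + 1 = n then 0 else i + 1) i n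
            else pickT cs (if i + 1 = n then 0 else i + 1) i n) = pickS (c :: cs) 0 n
      rw [if_pos rfl]
      show c :: pickT cs (if i + 1 = n then 0 else i + 1) i n = c :: pickS cs (n - 1) n
      congr 1
      by_cases h1 : i + 1 = n
      · rw [if_pos h1, ih 0 i hn hj]
        congr 1; split <;> omega
      · rw [if_neg h1, ih (i + 1) i (by omega) hj]
        congr 1; split <;> omega
    · have hd : ∃ d, (if i ≤ j then j - i else j + n - i) = d + 1 := by
        by_cases h : i ≤ j
        · exact ⟨j - i - 1, by rw [if_pos h]; omega⟩
        · exact ⟨j + n - i - 1, by rw [if_neg h]; omega⟩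
      obtain ⟨d, hdeq⟩ := hd
      rw [hdeq]
      show (if i = j then c :: pickT cs (if i + 1 = n then 0 else i + 1) j n
            else pickT cs (if i + 1 = n then 0 else i + 1) j n) = pickS (c :: cs) (d + 1) n
      rw [if_neg hij]
      show pickT cs (if i + 1 = n then 0 else i + 1) j n = pickS cs d n
      by_cases h1 : i + 1 = n
      · rw [if_pos h1, ih 0 j hn hj]
        congr 1; split at hdeq <;> split <;> omega
      · rw [if_neg h1, ih (i + 1) j (by omega) hj]
        congr 1; split at hdeq <;> split <;> omega

-- B's fold, bucket by bucket: each bucket j accumulates the cyclic picks for j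
theorem fold_buckets (n : Nat) :
    ∀ (l : List Char) (bs : List (List Char)) (i : Nat), i < n → bs.length = n →
      (l.foldl (gcsAltStep n) (bs, i)).1
        = (List.range n).map (fun j => bs.getD j [] ++ pickT l i j n) := by
  intro l
  induction l with
  | nil =>
    intro bs i _ hlen
    apply List.ext_getElem
    · simp [hlen]
    · intro k h1 h2
      simp only [List.foldl_nil]
      simp only [List.getElem_map, List.getElem_range]
      have hk : k < n := by simpa using h2
      rw [List.getD_eq_getElem bs [] (by omega)]
      simp [pickT]
  | cons c cs ih =>
    intro bs i hi hlen
    have hstep : (gcsAltStep n (bs, i) c)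
        = (bs.set i (bs.getD i [] ++ [c]), if i + 1 = n then 0 else i + 1) := rfl
    rw [List.foldl_cons, hstep,
        ih _ _ (by split <;> omega) (by simp [hlen])]
    refine List.map_congr_left (fun j hj => ?_)
    have hjn : j < n := List.mem_range.1 hj
    have hset : (bs.set i (bs.getD i [] ++ [c])).getD j []
        = if i = j then bs.getD i [] ++ [c] else bs.getD j [] := by
      by_cases hij : i = j
      · subst hij
        rw [if_pos rfl, List.getD_eq_getElem _ _ (by simp [hlen]; omega),
            List.getElem_set_self]
      · rw [if_neg hij]
        by_cases hjl : j < bs.length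
        · rw [List.getD_eq_getElem _ _ (by simpa using hjl),
              List.getD_eq_getElem _ _ hjl, List.getElem_set_ne hij]
        · rw [List.getD_eq_default _ _ (by simpa using hjl),
              List.getD_eq_default _ _ (by omega)]
    rw [hset]
    show _ = bs.getD j [] ++ pickT (c :: cs) i j n
    by_cases hij : i = j
    · subst hij
      rw [if_pos rfl]
      show (bs.getD i [] ++ [c]) ++ pickT cs (if i + 1 = n then 0 else i + 1) i n
          = bs.getD i [] ++ pickT (c :: cs) i i n
      rw [List.append_assoc]
      congr 1
      show [c] ++ pickT cs (if i + 1 = n then 0 else i + 1) i n = pickT (c :: cs) i i n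
      simp [pickT]
    · rw [if_neg hij]
      congr 1
      show pickT cs (if i + 1 = n then 0 else i + 1) j n = pickT (c :: cs) i j n
      simp [pickT, hij]

-- ===== VERDICT (by name: the statement is the Claim_ definition above) =====
theorem getCharacterStreams_spec : Claim_equal_getCharacterStreams := by
  intro cipher keySize _
  show getCharacterStreams cipher keySize = getCharacterStreams_alt cipher keySize
  by_cases hk : keySize ≤ 0
  · unfold getCharacterStreams getCharacterStreams_alt
    rw [if_pos hk]
    have h0 : PySem.List.pyRange 0 keySize 1 = [] := by
      rw [PySem.List.pyRange_of_pos _ _ (by norm_num)]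
      rw [if_neg (by omega)]
      rfl
    simp [h0]
  · obtain ⟨n, rfl⟩ : ∃ n : Nat, keySize = (n : Int) := ⟨keySize.toNat, by omega⟩
    have hn0 : 0 < n := by omega
    unfold getCharacterStreams getCharacterStreams_alt
    rw [if_neg hk]
    show (PySem.List.pyRange 0 (n : Int) 1).foldl
        (fun iStreams i => iStreams ++
          [String.mk ((PySem.List.pyRange i (PySem.Str.len cipher) (n : Int)).map
            (fun index => PySem.List.pyGetD cipher.toList index ' '))]) []
      = ((cipher.toList.foldl (gcsAltStep ((n : Int)).toNat)
          (List.replicate ((n : Int)).toNat [], 0)).1).map (fun bucket => String.mk bucket)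
    have htn : ((n : Int)).toNat = n := by omega
    rw [htn,
        PySem.List.foldl_append_singleton_eq_map
          (fun i => String.mk ((PySem.List.pyRange i (PySem.Str.len cipher) (n : Int)).map
            (fun index => PySem.List.pyGetD cipher.toList index ' '))),
        List.nil_append, PySem.List.pyRange_zero_natCast, List.map_map,
        fold_buckets n cipher.toList (List.replicate n []) 0 hn0 (by simp), List.map_map]
    refine List.map_congr_left (fun j hj => ?_)
    have hjn : j < n := List.mem_range.1 hj
    show String.mk ((PySem.List.pyRange ((j : Nat) : Int) (PySem.Str.len cipher) (n : Int)).map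
        (fun index => PySem.List.pyGetD cipher.toList index ' '))
      = String.mk ((List.replicate n ([] : List Char)).getD j [] ++ pickT cipher.toList 0 j n)
    congr 1
    rw [PySem.Str.len_eq, stride_eq_pickS n hn0 cipher.toList j hjn,
        pickT_eq_pickS n hn0 cipher.toList 0 j hn0 hjn]
    simp
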